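-- pv_equiv track=rewrite | github.com/Abhi591/NLP- | KeyEtractionNLP.py | freq_degree
-- ===== SOURCE A (Python) =====
-- from collections import defaultdict
--
-- def freq_degree(phrases):
-- 	word_freq=defaultdict(int)
-- 	word_degree=defaultdict(int)
-- 	for phrase in phrases:
-- 	    words=phrase.split(' ')     #will only split if theres more than one word
-- 	    phrase_length=len(words)    #len of ['really','like'] = 2 and ['show'] = 1
-- 	    for word in words:
-- 	        word_freq[word]+=1           #counts frequency of each word in the text
-- 	        word_degree[word]+=phrase_length
-- 	return word_freq,word_degree
-- ===== SOURCE B (Python) =====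
-- from collections import defaultdict, Counter
--
-- def freq_degree(phrases):
--     word_freq = Counter()
--     cooccur = defaultdict(Counter)
--     for phrase in phrases:
--         words = phrase.split(' ')
--         word_freq.update(words)
--         for w1 in words:
--             cooccur[w1].update(words)
--     word_degree = {w: sum(row.values()) for w, row in cooccur.items()}
--     return word_freq, word_degree
-- ===== Notes on version B (the rewrite author's own statement) =====
-- stated objective: alternative
-- what changed: B builds a word co-occurrence matrix (dict of Counters) per phrase and derives each word's degree as the row sum of its co-occurrence counts, instead of A's direct per-word accumulation of phrase lengths; frequency is a Counter updated per phrase.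
import Mathlib
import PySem

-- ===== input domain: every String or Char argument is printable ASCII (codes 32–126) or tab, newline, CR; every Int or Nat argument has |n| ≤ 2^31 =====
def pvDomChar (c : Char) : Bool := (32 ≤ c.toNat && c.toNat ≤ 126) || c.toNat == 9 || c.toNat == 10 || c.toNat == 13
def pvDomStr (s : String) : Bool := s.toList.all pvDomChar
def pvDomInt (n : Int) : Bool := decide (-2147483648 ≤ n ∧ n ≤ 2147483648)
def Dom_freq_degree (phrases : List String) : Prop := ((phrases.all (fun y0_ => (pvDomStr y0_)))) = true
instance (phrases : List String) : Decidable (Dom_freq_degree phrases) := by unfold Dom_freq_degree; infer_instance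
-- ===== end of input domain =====

-- B replaces A's direct per-word accumulation of phrase lengths by a word co-occurrence
-- matrix whose row sums give each word's degree (objective: alternative algorithm, same result).

-- phrase.split(' ') — sep " " is non-empty, so PySem.Str.split? is always `some`
def pySplitSp (s : String) : List String := (PySem.Str.split? s " ").getD []

-- ===== PORT A =====
def freq_degree (phrases : List String) : (List (String × Int)) × (List (String × Int)) :=
  let fd := phrases.foldl
    (fun (fd : PySem.Dict String Int × PySem.Dict String Int) phrase =>
      let words := pySplitSp phrase
      let phrase_length : Int := PySem.List.len words
      words.foldl (fun fd word =>
        (fd.1.modify word 0 (· + 1), fd.2.modify word 0 (· + phrase_length))) fd)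
    (PySem.Dict.empty, PySem.Dict.empty)
  (fd.1.items, fd.2.items)

-- ===== PORT B =====
-- Counter.update(words): add 1 for each word (also used for each co-occurrence row)
def bCountInto (words : List String) (cnt : PySem.Dict String Int) : PySem.Dict String Int :=
  words.foldl (fun r w => r.modify w 0 (· + 1)) cnt

def freq_degree_alt (phrases : List String) : (List (String × Int)) × (List (String × Int)) :=
  let word_freq := phrases.foldl (fun f phrase => bCountInto (pySplitSp phrase) f) PySem.Dict.empty
  let cooccur := phrases.foldl
    (fun (c : PySem.Dict String (PySem.Dict String Int)) phrase =>
      let words := pySplitSp phrase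
      words.foldl (fun c w1 => c.modify w1 PySem.Dict.empty (bCountInto words)) c) PySem.Dict.empty
  let word_degree := PySem.Dict.mk (cooccur.items.map (fun p => (p.1, p.2.values.sum)))
  (word_freq.items, word_degree.items)

-- ===== PRECONDITION & SPEC =====
def Spec_freq_degree (phrases : List String) (out : (List (String × Int)) × (List (String × Int))) : Prop := out = freq_degree_alt phrases
instance (phrases : List String) (out : (List (String × Int)) × (List (String × Int))) : Decidable (Spec_freq_degree phrases out) := by unfold Spec_freq_degree; infer_instance

-- ===== CLAIM (what is proved, stated in full; the proofs are below) =====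
def Claim_equal_freq_degree : Prop := ∀ (phrases : List String), Dom_freq_degree phrases → Spec_freq_degree phrases (freq_degree phrases)

-- ===== LEMMAS AND PROOFS =====

-- the abstraction from a co-occurrence row to a degree entry
def gRow (p : String × PySem.Dict String Int) : String × Int := (p.1, p.2.values.sum)

-- invariant linking A's degree dict to B's co-occurrence dict
def InvFD (d : PySem.Dict String Int) (c : PySem.Dict String (PySem.Dict String Int)) : Prop :=
  d.items = c.items.map gRow ∧ ∀ p ∈ c.items, p.2.keys.Nodup

-- list-level: replacing the (unique) entry at key w by its value + 1 raises the value sum by 1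
theorem fd_sumBump (l : List (String × Int)) (w : String) (q : String × Int)
    (hnd : (l.map (fun p => p.1)).Nodup) (hf : l.find? (fun p => p.1 == w) = some q) :
    ((l.map (fun p => if p.1 == w then (w, q.2 + 1) else p)).map (fun p => p.2)).sum
      = (l.map (fun p => p.2)).sum + 1 := by
  induction l with
  | nil => simp at hf
  | cons x t ih =>
    by_cases hx : x.1 = w
    · have hq : q = x := by
        rw [List.find?_cons_of_pos] at hf
        · exact (Option.some_inj.mp hf).symm
        · simp [hx]
      subst hq
      have htid : t.map (fun p => if p.1 == w then (w, q.2 + 1) else p) = t := by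
        have : ∀ p ∈ t, (if p.1 == w then (w, q.2 + 1) else p) = p := by
          intro p hp
          have : p.1 ≠ w := by
            intro hpe
            have := hnd
            simp only [List.map_cons, List.nodup_cons] at this
            exact this.1 (hx ▸ hpe ▸ List.mem_map_of_mem hp)
          simp [this]
        calc t.map (fun p => if p.1 == w then (w, q.2 + 1) else p)
            = t.map (fun p => p) := List.map_congr_left this
          _ = t := List.map_id' t
      simp only [List.map_cons, hx, beq_self_eq_true, if_pos, htid]
      simp only [List.sum_cons]
      ring
    · have hf' : t.find? (fun p => p.1 == w) = some q := by
        rw [List.find?_cons_of_neg] at hf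
        · exact hf
        · simp [hx]
      have hnd' : (t.map (fun p => p.1)).Nodup := by
        simp only [List.map_cons, List.nodup_cons] at hnd
        exact hnd.2
      have := ih hnd' hf'
      simp only [List.map_cons]
      rw [if_neg (by simp [hx])]
      simp only [List.sum_cons]
      rw [this]
      ring

theorem fd_contains_of_items (d : PySem.Dict String Int)
    (c : PySem.Dict String (PySem.Dict String Int)) (h : d.items = c.items.map gRow)
    (w : String) : d.contains w = c.contains w := by
  simp only [PySem.Dict.contains, h, List.any_map]
  rfl

theorem fd_get?_of_items (d : PySem.Dict String Int)
    (c : PySem.Dict String (PySem.Dict String Int)) (h : d.items = c.items.map gRow)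
    (w : String) : d.get? w = (c.get? w).map (fun row => row.values.sum) := by
  simp only [PySem.Dict.get?, h, List.find?_map]
  have hpred : ((fun p : String × Int => p.1 == w) ∘ gRow)
      = (fun p : String × PySem.Dict String Int => p.1 == w) := rfl
  rw [hpred]
  cases List.find? (fun p : String × PySem.Dict String Int => p.1 == w) c.items with
  | none => rfl
  | some p => rfl

-- single +1 bump on a nodup-keyed dict
theorem fd_bump (row : PySem.Dict String Int) (w : String) (hnd : row.keys.Nodup) :
    (row.modify w 0 (· + 1)).values.sum = row.values.sum + 1 := by
  simp only [PySem.Dict.modify]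
  by_cases h : row.contains w = true
  · cases hf : row.items.find? (fun p => p.1 == w) with
    | none =>
      exfalso
      rw [List.find?_eq_none] at hf
      simp only [PySem.Dict.contains, List.any_eq_true] at h
      obtain ⟨p, hp, hpe⟩ := h
      exact hf p hp hpe
    | some q =>
      have hg : row.getD w 0 = q.2 := by
        simp [PySem.Dict.getD, PySem.Dict.get?, hf]
      rw [hg]
      simp only [PySem.Dict.values, PySem.Dict.items_insert_of_contains row (q.2 + 1) h]
      exact fd_sumBump row.items w q hnd hf
  · have h' : row.contains w = false := by simpa using h
    rw [PySem.Dict.getD_of_not_contains row 0 h']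
    simp only [PySem.Dict.values, PySem.Dict.items_insert_of_not_contains row (0 + 1) h']
    simp

theorem fd_bump_nodup (row : PySem.Dict String Int) (w : String) (hnd : row.keys.Nodup) :
    (row.modify w 0 (· + 1)).keys.Nodup := by
  simp only [PySem.Dict.modify]
  exact PySem.Dict.nodup_keys_insert _ _ _ hnd

theorem fd_rowsum (ws : List String) (row : PySem.Dict String Int) (hnd : row.keys.Nodup) :
    (bCountInto ws row).values.sum = row.values.sum + (ws.length : Int)
      ∧ (bCountInto ws row).keys.Nodup := by
  induction ws generalizing row with
  | nil => simpa [bCountInto] using hnd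
  | cons w t ih =>
    have h1 := fd_bump row w hnd
    have h2 := fd_bump_nodup row w hnd
    have := ih (row.modify w 0 (· + 1)) h2
    refine ⟨?_, this.2⟩
    have : (bCountInto (w :: t) row).values.sum
        = (row.modify w 0 (· + 1)).values.sum + (t.length : Int) := (ih _ h2).1
    rw [this, h1]
    simp only [List.length_cons]
    push_cast
    ring

-- one word step preserves the invariant
theorem fd_step (d : PySem.Dict String Int) (c : PySem.Dict String (PySem.Dict String Int))
    (ws : List String) (n : Int) (hn : n = (ws.length : Int)) (w : String)
    (hInv : InvFD d c) :
    InvFD (d.modify w 0 (· + n)) (c.modify w PySem.Dict.empty (bCountInto ws)) := by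
  obtain ⟨hP, hR⟩ := hInv
  have hC := fd_contains_of_items d c hP w
  have hg := fd_get?_of_items d c hP w
  simp only [PySem.Dict.modify, InvFD]
  by_cases h : c.contains w = true
  · cases hcf : c.get? w with
    | none =>
      exfalso
      rw [PySem.Dict.get?_eq_none_iff_contains] at hcf
      rw [hcf] at h
      exact Bool.false_ne_true h
    | some row =>
      have hrowmem : (w, row) ∈ c.items := PySem.Dict.mem_items_of_get?_eq_some c hcf
      have hrownd : row.keys.Nodup := hR _ hrowmem
      have hsum := (fd_rowsum ws row hrownd).1
      have hdgd : d.getD w 0 = row.values.sum := by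
        simp [PySem.Dict.getD, hg, hcf]
      have hcgd : c.getD w PySem.Dict.empty = row := by
        simp [PySem.Dict.getD, hcf]
      have hdc : d.contains w = true := by rw [hC]; exact h
      constructor
      · rw [PySem.Dict.items_insert_of_contains d (d.getD w 0 + n) hdc,
          PySem.Dict.items_insert_of_contains c (bCountInto ws (c.getD w PySem.Dict.empty)) h,
          hP, List.map_map, List.map_map]
        apply List.map_congr_left
        intro p hp
        by_cases hpw : p.1 = w
        · simp only [Function.comp, gRow, hpw, beq_self_eq_true, if_pos]
          rw [hdgd, hcgd, hsum, hn]
        · simp [Function.comp, gRow, hpw]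
      · intro p hp
        rcases (PySem.Dict.mem_items_insert c w _ p).1 hp with hpe | ⟨hmem, _⟩
        · subst hpe
          rw [hcgd]
          exact (fd_rowsum ws row hrownd).2
        · exact hR _ hmem
  · have hc' : c.contains w = false := by simpa using h
    have hd' : d.contains w = false := by rw [hC]; exact hc'
    have hsum := (fd_rowsum ws PySem.Dict.empty PySem.Dict.nodup_keys_empty).1
    constructor
    · rw [PySem.Dict.items_insert_of_not_contains d (d.getD w 0 + n) hd',
        PySem.Dict.items_insert_of_not_contains c (bCountInto ws (c.getD w PySem.Dict.empty)) hc',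
        hP, List.map_append]
      congr 1
      simp only [List.map_cons, List.map_nil, gRow]
      rw [PySem.Dict.getD_of_not_contains d 0 hd',
        PySem.Dict.getD_of_not_contains c PySem.Dict.empty hc', hsum, hn]
      simp [PySem.Dict.values, PySem.Dict.empty]
    · intro p hp
      rcases (PySem.Dict.mem_items_insert c w _ p).1 hp with hpe | ⟨hmem, _⟩
      · subst hpe
        rw [PySem.Dict.getD_of_not_contains c PySem.Dict.empty hc']
        exact (fd_rowsum ws PySem.Dict.empty PySem.Dict.nodup_keys_empty).2
      · exact hR _ hmem

-- a whole phrase's inner loop preserves the invariant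
theorem fd_inner (u : List String) (ws : List String) (n : Int) (hn : n = (ws.length : Int))
    (d : PySem.Dict String Int) (c : PySem.Dict String (PySem.Dict String Int))
    (hInv : InvFD d c) :
    InvFD (u.foldl (fun d w => d.modify w 0 (· + n)) d)
      (u.foldl (fun c w1 => c.modify w1 PySem.Dict.empty (bCountInto ws)) c) := by
  induction u generalizing d c with
  | nil => exact hInv
  | cons w t ih => exact ih _ _ (fd_step d c ws n hn w hInv)

-- A's paired fold splits into the frequency fold and the degree fold
theorem fd_fission (phrases : List String) (a b : PySem.Dict String Int) :
    phrases.foldl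
      (fun (fd : PySem.Dict String Int × PySem.Dict String Int) phrase =>
        let words := pySplitSp phrase
        let phrase_length : Int := PySem.List.len words
        words.foldl (fun fd word =>
          (fd.1.modify word 0 (· + 1), fd.2.modify word 0 (· + phrase_length))) fd) (a, b)
    = (phrases.foldl (fun f phrase => bCountInto (pySplitSp phrase) f) a,
       phrases.foldl (fun d phrase =>
         (pySplitSp phrase).foldl
           (fun d w => d.modify w 0 (· + PySem.List.len (pySplitSp phrase))) d) b) := by
  induction phrases generalizing a b with
  | nil => rfl
  | cons ph t ih =>
    simp only [List.foldl_cons]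
    rw [PySem.List.foldl_prod_mk
      (fun (x : PySem.Dict String Int) (w : String) => x.modify w 0 (· + 1))
      (fun (x : PySem.Dict String Int) (w : String) =>
        x.modify w 0 (· + PySem.List.len (pySplitSp ph))) (pySplitSp ph) a b]
    exact ih _ _

-- the outer degree fold stays linked to the co-occurrence fold
theorem fd_outer (phrases : List String) (d : PySem.Dict String Int)
    (c : PySem.Dict String (PySem.Dict String Int)) (hInv : InvFD d c) :
    InvFD
      (phrases.foldl (fun d phrase =>
        (pySplitSp phrase).foldl
          (fun d w => d.modify w 0 (· + PySem.List.len (pySplitSp phrase))) d) d)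
      (phrases.foldl (fun c phrase =>
        (pySplitSp phrase).foldl
          (fun c w1 => c.modify w1 PySem.Dict.empty (bCountInto (pySplitSp phrase))) c) c) := by
  induction phrases generalizing d c with
  | nil => exact hInv
  | cons ph t ih =>
    exact ih _ _ (fd_inner (pySplitSp ph) (pySplitSp ph) (PySem.List.len (pySplitSp ph))
      (PySem.List.len_eq _) d c hInv)

-- ===== VERDICT (by name: the statement is the Claim_ definition above) =====
theorem freq_degree_spec : Claim_equal_freq_degree := by
  intro phrases _
  unfold Spec_freq_degree freq_degree freq_degree_alt
  simp only []
  rw [fd_fission]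
  have hInv : InvFD (PySem.Dict.empty) (PySem.Dict.empty : PySem.Dict String (PySem.Dict String Int)) := by
    constructor
    · rfl
    · intro p hp; cases hp
  have h := fd_outer phrases _ _ hInv
  exact Prod.ext rfl h.1
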